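-- pv_equiv track=rewrite | github.com/prateek/original_performance_takehome | analyze_schedule.py | idle_runs
-- ===== SOURCE A (Python) =====
-- def idle_runs(counts: list[int]) -> list[tuple[int, int, int]]:
--     runs: list[tuple[int, int, int]] = []
--     run_start: int | None = None
--     for i, c in enumerate(counts):
--         if c == 0:
--             if run_start is None:
--                 run_start = i
--             continue
--         if run_start is not None:
--             runs.append((run_start, i - 1, i - run_start))
--             run_start = None
--     if run_start is not None:
--         runs.append((run_start, len(counts) - 1, len(counts) - run_start))
--     runs.sort(key=lambda r: r[2], reverse=True)
--     return runs
-- ===== SOURCE B (Python) =====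
-- def idle_runs(counts: list[int]) -> list[tuple[int, int, int]]:
--     # Data-parallel boundary detection: a zero whose left neighbor is absent or
--     # nonzero starts a run; a zero whose right neighbor is absent or nonzero
--     # ends one; pairing k-th start with k-th end yields the runs in order.
--     starts = [i for i, (p, c) in enumerate(zip([None] + counts, counts))
--               if c == 0 and p != 0]
--     ends = [i for i, (c, nx) in enumerate(zip(counts, counts[1:] + [None]))
--             if c == 0 and nx != 0]
--     runs = [(s, e, e - s + 1) for s, e in zip(starts, ends)]
--     runs.sort(key=lambda r: r[2], reverse=True)
--     return runs
-- ===== Notes on version B (the rewrite author's own statement) =====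
-- stated objective: alternative
-- what changed: Replaced A's stateful single-pass scan (Optional run_start state machine) with stateless data-parallel boundary detection: comprehensions over zip with shifted neighbors pick out run starts (zero with non-zero/absent left neighbor) and run ends (zero with non-zero/absent right neighbor), and zipping starts with ends yields the runs; the stable reverse sort by length is unchanged.
import Mathlib
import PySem

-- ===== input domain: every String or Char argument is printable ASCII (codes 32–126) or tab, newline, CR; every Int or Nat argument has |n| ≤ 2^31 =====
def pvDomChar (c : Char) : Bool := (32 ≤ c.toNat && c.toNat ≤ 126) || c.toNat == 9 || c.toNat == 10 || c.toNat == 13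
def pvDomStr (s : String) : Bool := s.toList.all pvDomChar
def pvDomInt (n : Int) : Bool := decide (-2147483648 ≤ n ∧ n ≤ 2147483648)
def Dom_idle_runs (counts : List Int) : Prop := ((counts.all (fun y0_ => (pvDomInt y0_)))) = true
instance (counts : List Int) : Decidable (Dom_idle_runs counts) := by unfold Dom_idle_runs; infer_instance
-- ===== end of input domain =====

-- B replaces A's stateful scan by neighbor-comparison boundary detection (three comprehensions + zip), an alternative stateless decomposition of the same cost.

-- ===== PORT A =====
-- one loop step of A: state = (runs, run_start), element = (i, c)
def stepA (s : List (Int × Int × Int) × Option Int) (p : Int × Int) :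
    List (Int × Int × Int) × Option Int :=
  if p.2 = 0 then
    match s.2 with
    | none => (s.1, some p.1)
    | some _ => s
  else
    match s.2 with
    | some rs => (s.1 ++ [(rs, p.1 - 1, p.1 - rs)], none)
    | none => s

-- A's trailing 'if run_start is not None' append; n = len(counts)
def finA (n : Int) (st : List (Int × Int × Int) × Option Int) : List (Int × Int × Int) :=
  match st.2 with
  | some rs => st.1 ++ [(rs, n - 1, n - rs)]
  | none => st.1

def idle_runs (counts : List Int) : List (Int × Int × Int) :=
  PySem.List.sorted
    (finA (counts.length : Int) ((PySem.List.enumerate counts 0).foldl stepA ([], none)))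
    (fun r => r.2.2) true

-- ===== PORT B =====
-- starts = [i for i,(p,c) in enumerate(zip([None]+counts, counts)) if c == 0 and p != 0]
-- ends   = [i for i,(c,nx) in enumerate(zip(counts, counts[1:]+[None])) if c == 0 and nx != 0]
-- (the heterogeneous Python lists [None]+counts / counts[1:]+[None] become Option Int lists via `some`)
def idle_runs_alt (counts : List Int) : List (Int × Int × Int) :=
  let starts :=
    (PySem.List.enumerate (List.zip ((none : Option Int) :: counts.map some) counts) 0).filterMap
      (fun pc => if pc.2.2 = 0 ∧ pc.2.1 ≠ some 0 then some pc.1 else none)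
  let ends :=
    (PySem.List.enumerate (List.zip counts ((PySem.List.slice counts (some 1) none).map some ++ [(none : Option Int)])) 0).filterMap
      (fun pc => if pc.2.1 = 0 ∧ pc.2.2 ≠ some 0 then some pc.1 else none)
  PySem.List.sorted ((List.zip starts ends).map (fun se => (se.1, se.2, se.2 - se.1 + 1)))
    (fun r => r.2.2) true

-- ===== PRECONDITION & SPEC =====
def Spec_idle_runs (counts : List Int) (out : List (Int × Int × Int)) : Prop := out = idle_runs_alt counts
instance (counts : List Int) (out : List (Int × Int × Int)) : Decidable (Spec_idle_runs counts out) := by unfold Spec_idle_runs; infer_instance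

-- ===== CLAIM (what is proved, stated in full; the proofs are below) =====
def Claim_equal_idle_runs : Prop := ∀ (counts : List Int), Dom_idle_runs counts → Spec_idle_runs counts (idle_runs counts)

-- ===== LEMMAS AND PROOFS =====

-- common reference form of the run list (proof-only): length of the leading zero block
def czero : List Int → Nat
  | [] => 0
  | c :: rest => if c = 0 then czero rest + 1 else 0

-- reference run list: runs in order of start index
def goRuns : List Int → Int → List (Int × Int × Int)
  | [], _ => []
  | c :: rest, i =>
    if c = 0 then
      (i, i + ((czero rest + 1 : Nat) : Int) - 1, ((czero rest + 1 : Nat) : Int)) ::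
        goRuns (rest.drop (czero rest)) (i + ((czero rest + 1 : Nat) : Int))
    else goRuns rest (i + 1)
termination_by xs _ => xs.length
decreasing_by all_goals (simp only [List.length_cons, List.length_drop]; omega)

lemma goRuns_nil (i : Int) : goRuns [] i = [] := by rw [goRuns.eq_def]

lemma goRuns_cons_zero {c : Int} (h : c = 0) (rest : List Int) (i : Int) :
    goRuns (c :: rest) i =
      (i, i + ((czero rest + 1 : Nat) : Int) - 1, ((czero rest + 1 : Nat) : Int)) ::
        goRuns (rest.drop (czero rest)) (i + ((czero rest + 1 : Nat) : Int)) := by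
  rw [goRuns.eq_def]; simp [h]

lemma goRuns_cons_nz {c : Int} (h : c ≠ 0) (rest : List Int) (i : Int) :
    goRuns (c :: rest) i = goRuns rest (i + 1) := by
  rw [goRuns.eq_def]; simp [h]

-- ---- A side: loop + final append produce goRuns (pre-sort) ----

lemma stepA_zero_none {c i : Int} (h : c = 0) (runs : List (Int × Int × Int)) :
    stepA (runs, none) (i, c) = (runs, some i) := by simp [stepA, h]

lemma stepA_zero_some {c i : Int} (h : c = 0) (runs : List (Int × Int × Int)) (rs : Int) :
    stepA (runs, some rs) (i, c) = (runs, some rs) := by simp [stepA, h]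

lemma stepA_nz_none {c i : Int} (h : c ≠ 0) (runs : List (Int × Int × Int)) :
    stepA (runs, none) (i, c) = (runs, none) := by simp [stepA, h]

lemma stepA_nz_some {c i : Int} (h : c ≠ 0) (runs : List (Int × Int × Int)) (rs : Int) :
    stepA (runs, some rs) (i, c) = (runs ++ [(rs, i - 1, i - rs)], none) := by simp [stepA, h]

lemma loopA_eq_goRuns (xs : List Int) : ∀ (i : Int) (runs : List (Int × Int × Int)),
    (finA (i + xs.length) ((PySem.List.enumerate xs i).foldl stepA (runs, none)) =
      runs ++ goRuns xs i)
    ∧ ∀ rs : Int,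
      finA (i + xs.length) ((PySem.List.enumerate xs i).foldl stepA (runs, some rs)) =
        runs ++ (rs, i + (czero xs : Int) - 1, i + (czero xs : Int) - rs) ::
          goRuns (xs.drop (czero xs)) (i + (czero xs : Int)) := by
  induction xs with
  | nil =>
    intro i runs
    constructor
    · simp [PySem.List.enumerate_nil, finA, goRuns_nil]
    · intro rs
      simp [PySem.List.enumerate_nil, finA, goRuns_nil, czero]
  | cons c rest ih =>
    intro i runs
    have hlen : i + ((c :: rest).length : Int) = (i + 1) + (rest.length : Int) := by
      simp; ring
    constructor
    · by_cases hc : c = 0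
      · rw [PySem.List.enumerate_cons, List.foldl_cons, stepA_zero_none hc, hlen,
          ((ih (i + 1) runs).2) i, goRuns_cons_zero hc]
        push_cast
        ring_nf
      · rw [PySem.List.enumerate_cons, List.foldl_cons, stepA_nz_none hc, hlen,
          (ih (i + 1) runs).1, goRuns_cons_nz hc]
    · intro rs
      by_cases hc : c = 0
      · have hcz : czero (c :: rest) = czero rest + 1 := by simp [czero, hc]
        rw [PySem.List.enumerate_cons, List.foldl_cons, stepA_zero_some hc, hlen,
          ((ih (i + 1) runs).2) rs, hcz]
        have hdrop : (c :: rest).drop (czero rest + 1) = rest.drop (czero rest) := by simp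
        rw [hdrop]
        push_cast
        ring_nf
      · have hcz : czero (c :: rest) = 0 := by simp [czero, hc]
        rw [PySem.List.enumerate_cons, List.foldl_cons, stepA_nz_some hc, hlen,
          (ih (i + 1) (runs ++ [(rs, i - 1, i - rs)])).1, hcz]
        simp only [Nat.cast_zero, add_zero, List.drop_zero]
        rw [goRuns_cons_nz hc]
        simp

-- ---- B side: the starts / ends comprehensions, parametrised by the left neighbor ----

def Sfun (p : Option Int) (xs : List Int) (i : Int) : List Int :=
  (PySem.List.enumerate (List.zip (p :: xs.map some) xs) i).filterMap
    (fun pc => if pc.2.2 = 0 ∧ pc.2.1 ≠ some 0 then some pc.1 else none)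

def Efun (xs : List Int) (i : Int) : List Int :=
  (PySem.List.enumerate (List.zip xs ((PySem.List.slice xs (some 1) none).map some ++ [(none : Option Int)])) i).filterMap
    (fun pc => if pc.2.1 = 0 ∧ pc.2.2 ≠ some 0 then some pc.1 else none)

lemma Sfun_nil (p : Option Int) (i : Int) : Sfun p [] i = [] := by
  simp [Sfun, PySem.List.enumerate_nil]

lemma Sfun_cons (p : Option Int) (c : Int) (rest : List Int) (i : Int) :
    Sfun p (c :: rest) i =
      (if c = 0 ∧ p ≠ some 0 then [i] else []) ++ Sfun (some c) rest (i + 1) := by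
  simp only [Sfun, List.map_cons, List.zip_cons_cons, PySem.List.enumerate_cons,
    List.filterMap_cons]
  split_ifs <;> simp_all

lemma Efun_nil (i : Int) : Efun [] i = [] := by
  simp [Efun, PySem.List.enumerate_nil]

lemma Efun_cons (c : Int) (rest : List Int) (i : Int) :
    Efun (c :: rest) i =
      (if c = 0 ∧ rest.head? ≠ some 0 then [i] else []) ++ Efun rest (i + 1) := by
  cases rest with
  | nil =>
    simp only [Efun, PySem.List.slice_from_one, List.tail_cons, List.tail_nil, List.map_nil,
      List.nil_append, List.zip_cons_cons, List.zip_nil_right, PySem.List.enumerate_cons,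
      PySem.List.enumerate_nil, List.filterMap_cons, List.filterMap_nil]
    split_ifs <;> simp_all
  | cons r t =>
    simp only [Efun, PySem.List.slice_from_one, List.tail_cons, List.map_cons, List.cons_append,
      List.zip_cons_cons, PySem.List.enumerate_cons, List.filterMap_cons]
    split_ifs <;> simp_all

-- in a zero run (prev = 0), no start is emitted until the run ends
lemma Sfun_skip (xs : List Int) : ∀ j : Int,
    Sfun (some 0) xs j = Sfun (some 1) (xs.drop (czero xs)) (j + (czero xs : Int)) := by
  induction xs with
  | nil => intro j; simp [czero, Sfun_nil]
  | cons c rest ih =>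
    intro j
    by_cases hc : c = 0
    · subst hc
      have hcz : czero ((0 : Int) :: rest) = czero rest + 1 := by simp [czero]
      rw [Sfun_cons, hcz]
      simp only [List.drop_succ_cons]
      rw [if_neg (by simp), List.nil_append, ih (j + 1)]
      congr 1
      push_cast; ring
    · have hcz : czero (c :: rest) = 0 := by simp [czero, hc]
      rw [hcz]
      simp only [List.drop_zero, Nat.cast_zero, add_zero]
      rw [Sfun_cons, Sfun_cons]
      simp [hc]

-- a zero run starting at the head ends exactly after its czero-block
lemma Efun_zero_head : ∀ (rest : List Int) (i : Int),
    Efun ((0 : Int) :: rest) i =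
      (i + (czero rest : Int)) :: Efun (rest.drop (czero rest)) (i + 1 + (czero rest : Int)) := by
  intro rest
  induction rest with
  | nil => intro i; simp [Efun_cons, Efun_nil, czero]
  | cons r t ih =>
    intro i
    by_cases hr : r = 0
    · subst hr
      have hcz : czero ((0 : Int) :: t) = czero t + 1 := by simp [czero]
      rw [Efun_cons, hcz]
      simp only [List.head?_cons, List.drop_succ_cons]
      rw [if_neg (by simp), List.nil_append, ih (i + 1)]
      push_cast
      ring_nf
    · have hcz : czero (r :: t) = 0 := by simp [czero, hr]
      rw [Efun_cons, hcz]
      simp [hr]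

-- zip of starts and ends is the reference run list
lemma zip_SE_eq_goRuns : ∀ (xs : List Int) (i : Int), ∀ p : Option Int, p ≠ some 0 →
    (List.zip (Sfun p xs i) (Efun xs i)).map (fun se => (se.1, se.2, se.2 - se.1 + 1)) =
      goRuns xs i := by
  intro xs i
  induction xs, i using goRuns.induct with
  | case1 i => intro p _; simp [Sfun_nil, Efun_nil, goRuns_nil]
  | case2 rest i ih =>
    intro p hp
    rw [Sfun_cons, Efun_zero_head, goRuns_cons_zero rfl, if_pos (by simp [hp]),
      List.singleton_append, Sfun_skip, List.zip_cons_cons, List.map_cons]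
    have hoff : i + 1 + (czero rest : Int) = i + ((czero rest + 1 : Nat) : Int) := by
      push_cast; ring
    rw [hoff, ih (some 1) (by simp)]
    congr 1
    push_cast
    ring_nf
  | case3 c rest i hc ih =>
    intro p hp
    rw [Sfun_cons, Efun_cons, goRuns_cons_nz hc, if_neg (by simp [hc]),
      if_neg (by simp [hc]), List.nil_append, List.nil_append]
    exact ih (some c) (by simp [hc])

-- ===== VERDICT (by name: the statement is the Claim_ definition above) =====
theorem idle_runs_spec : Claim_equal_idle_runs := by
  intro counts _
  unfold Spec_idle_runs idle_runs idle_runs_alt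
  have hA := (loopA_eq_goRuns counts 0 []).1
  simp only [zero_add, List.nil_append] at hA
  rw [hA]
  have hB := zip_SE_eq_goRuns counts 0 none (by simp)
  rw [← hB]
  rfl
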